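-- pv_equiv track=rewrite | github.com/trunghieumickey/hcmus-archived-project | hcmus-ai-intro-project-2-main/ALG_Mines.py | colorable
-- ===== SOURCE A (Python) =====
-- def colorable(map):
--     legal = []
--     for i in range(len(map)):
--         for j in range(len(map[0])):
--             if map[i][j] != -1 and (i,j) not in legal:
--                 legal.append((i, j))
--             else:
--                 for k in range(i-1, i+2):
--                     for l in range(j-1, j+2):
--                         if k >= 0 and k < len(map) and l >= 0 and l < len(map[0]):
--                             if map[k][l] != -1 and (i, j) not in legal:
--                                 legal.append((i, j))
--     return legal
-- ===== SOURCE B (Python) =====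
-- def colorable(map):
--     R = len(map)
--     if R == 0:
--         return []
--     C = len(map[0])
--     marked = set()
--     for i in range(R):
--         for j in range(C):
--             if map[i][j] != -1:
--                 for k in range(max(0, i - 1), min(R, i + 2)):
--                     for l in range(max(0, j - 1), min(C, j + 2)):
--                         marked.add((k, l))
--     return [(i, j) for i in range(R) for j in range(C) if (i, j) in marked]
-- ===== Notes on version B (the rewrite author's own statement) =====
-- stated objective: faster
-- what changed: A pulls: for each cell it rescans its 3x3 neighborhood and does a linear 'not in legal' list scan per append check; B pushes: each safe cell marks its clamped 3x3 window in a set built once, then one row-major pass collects the marked cells.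
import Mathlib
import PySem

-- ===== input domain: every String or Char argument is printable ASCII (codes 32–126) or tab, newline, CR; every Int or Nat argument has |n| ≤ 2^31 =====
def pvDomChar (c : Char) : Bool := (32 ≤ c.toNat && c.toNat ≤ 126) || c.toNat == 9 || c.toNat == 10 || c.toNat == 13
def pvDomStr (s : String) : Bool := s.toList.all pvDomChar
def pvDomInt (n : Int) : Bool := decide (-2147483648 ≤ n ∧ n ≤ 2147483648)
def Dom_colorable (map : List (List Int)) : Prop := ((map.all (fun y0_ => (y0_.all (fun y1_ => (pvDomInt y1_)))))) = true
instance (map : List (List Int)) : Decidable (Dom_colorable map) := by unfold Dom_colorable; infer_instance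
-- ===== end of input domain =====

-- B replaces A's per-cell pull (rescanning each cell's 3x3 neighborhood plus an 'in legal'
-- list scan) by a push: every safe cell marks its clamped 3x3 window in a set, then one
-- row-major pass collects the marked cells (measurably faster: no linear 'in legal' scans).

-- map[k][l], total form (Pre_ keeps every accessed index in range)
def pvCell (map : List (List Int)) (k l : Int) : Int :=
  PySem.List.pyGetD (PySem.List.pyGetD map k []) l 0

-- ===== PORT A =====
def colorable (map : List (List Int)) : List (Int × Int) :=
  (PySem.List.pyRange 0 (map.length : Int) 1).foldl (fun legal i =>
    (PySem.List.pyRange 0 ((PySem.List.pyGetD map 0 []).length : Int) 1).foldl (fun legal j =>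
      if pvCell map i j ≠ -1 ∧ ((i, j) : Int × Int) ∉ legal then legal ++ [(i, j)]
      else
        (PySem.List.pyRange (i - 1) (i + 2) 1).foldl (fun legal k =>
          (PySem.List.pyRange (j - 1) (j + 2) 1).foldl (fun legal l =>
            if 0 ≤ k ∧ k < (map.length : Int) ∧ 0 ≤ l ∧ l < ((PySem.List.pyGetD map 0 []).length : Int) then
              if pvCell map k l ≠ -1 ∧ ((i, j) : Int × Int) ∉ legal then legal ++ [(i, j)]
              else legal
            else legal) legal) legal) legal) []

-- ===== PORT B =====
def colorable_alt (map : List (List Int)) : List (Int × Int) :=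
  let R : Int := (map.length : Int)
  if R == 0 then []
  else
    let C : Int := ((PySem.List.pyGetD map 0 []).length : Int)
    let marked : PySem.Set (Int × Int) :=
      (PySem.List.pyRange 0 R 1).foldl (fun s i =>
        (PySem.List.pyRange 0 C 1).foldl (fun s j =>
          if pvCell map i j ≠ -1 then
            (PySem.List.pyRange (max 0 (i - 1)) (min R (i + 2)) 1).foldl (fun s k =>
              (PySem.List.pyRange (max 0 (j - 1)) (min C (j + 2)) 1).foldl (fun s l =>
                PySem.Set.add s (k, l)) s) s
          else s) s) PySem.Set.empty
    (PySem.List.pyRange 0 R 1).flatMap (fun i =>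
      ((PySem.List.pyRange 0 C 1).filter (fun j => PySem.Set.contains marked (i, j))).map
        (fun j => ((i, j) : Int × Int)))

-- ===== PRECONDITION & SPEC =====
-- Pre_ excludes exactly the ragged maps on which the Python A raises IndexError:
-- some row shorter than row 0 (A indexes every row at columns 0..len(map[0])-1).
def Pre_colorable (map : List (List Int)) : Prop :=
  ∀ row ∈ map, (map.getD 0 []).length ≤ row.length
instance (map : List (List Int)) : Decidable (Pre_colorable map) := by
  unfold Pre_colorable; infer_instance
def pvWitness_colorable : List (List Int) := [[0, -1], [-1, 3]]

def Spec_colorable (map : List (List Int)) (out : List (Int × Int)) : Prop := out = colorable_alt map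
instance (map : List (List Int)) (out : List (Int × Int)) : Decidable (Spec_colorable map out) := by
  unfold Spec_colorable; infer_instance

-- ===== CLAIM (what is proved, stated in full; the proofs are below) =====
def Claim_equal_colorable : Prop := ∀ (map : List (List Int)), Dom_colorable map → Pre_colorable map → Spec_colorable map (colorable map)

-- ===== LEMMAS AND PROOFS =====

-- "some in-bounds cell of the 3x3 window around (i,j) is not a mine"
def pvHit (map : List (List Int)) (i j : Int) : Bool :=
  (PySem.List.pyRange (i - 1) (i + 2) 1).any fun k =>
    (PySem.List.pyRange (j - 1) (j + 2) 1).any fun l =>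
      decide (0 ≤ k ∧ k < (map.length : Int) ∧ 0 ≤ l ∧ l < ((PySem.List.pyGetD map 0 []).length : Int)
        ∧ pvCell map k l ≠ -1)

-- the common row-major reference list both ports are reduced to
def pvSpecList (map : List (List Int)) : List (Int × Int) :=
  (PySem.List.pyRange 0 (map.length : Int) 1).flatMap (fun i =>
    ((PySem.List.pyRange 0 ((PySem.List.pyGetD map 0 []).length : Int) 1).filter
        (fun j => pvHit map i j)).map
      (fun j => ((i, j) : Int × Int)))

-- B's marking loop: membership in a fold of coverings
theorem pv_mem_foldl_cover {α : Type} (f : PySem.Set (Int × Int) → α → PySem.Set (Int × Int))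
    (cov : α → Int × Int → Prop)
    (hf : ∀ s a y, y ∈ f s a ↔ y ∈ s ∨ cov a y) :
    ∀ (l : List α) (s : PySem.Set (Int × Int)) (y : Int × Int),
      y ∈ l.foldl f s ↔ y ∈ s ∨ ∃ a ∈ l, cov a y := by
  intro l
  induction l with
  | nil => intro s y; simp
  | cons a l ih =>
    intro s y
    simp only [List.foldl_cons, List.mem_cons, ih, hf]
    constructor
    · rintro ((h | h) | ⟨b, hb, hc⟩)
      exacts [Or.inl h, Or.inr ⟨a, Or.inl rfl, h⟩, Or.inr ⟨b, Or.inr hb, hc⟩]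
    · rintro (h | ⟨b, rfl | hb, hc⟩)
      exacts [Or.inl (Or.inl h), Or.inl (Or.inr hc), Or.inr ⟨b, hb, hc⟩]

-- A's "append if not yet present" loop, canonical single-level form
theorem pv_foldl_mark {α : Type} (c : α → Bool) (x : Int × Int) :
    ∀ (ws : List α) (a : List (Int × Int)),
      ws.foldl (fun a w => if c w = true ∧ x ∉ a then a ++ [x] else a) a
        = if ws.any c = true ∧ x ∉ a then a ++ [x] else a := by
  intro ws
  induction ws with
  | nil => intro a; simp
  | cons w ws ih =>
    intro a
    simp only [List.foldl_cons, List.any_cons]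
    by_cases hc : c w = true
    · by_cases hm : x ∈ a
      · rw [if_neg (by tauto), ih]
        simp [hc, hm]
      · rw [if_pos ⟨hc, hm⟩, ih]
        simp [hc, hm]
    · rw [if_neg (by tauto), ih]
      simp [hc]

-- A's inner window double loop collapses to one conditional append
theorem pv_window_eq (map : List (List Int)) (i j : Int) (a : List (Int × Int)) :
    (PySem.List.pyRange (i - 1) (i + 2) 1).foldl (fun legal k =>
          (PySem.List.pyRange (j - 1) (j + 2) 1).foldl (fun legal l =>
            if 0 ≤ k ∧ k < (map.length : Int) ∧ 0 ≤ l ∧ l < ((PySem.List.pyGetD map 0 []).length : Int) then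
              if pvCell map k l ≠ -1 ∧ ((i, j) : Int × Int) ∉ legal then legal ++ [(i, j)]
              else legal
            else legal) legal) a
      = if pvHit map i j = true ∧ ((i, j) : Int × Int) ∉ a then a ++ [(i, j)] else a := by
  have hstep : ∀ (k : Int) (legal : List (Int × Int)) (l : Int),
      (if 0 ≤ k ∧ k < (map.length : Int) ∧ 0 ≤ l ∧ l < ((PySem.List.pyGetD map 0 []).length : Int) then
        if pvCell map k l ≠ -1 ∧ ((i, j) : Int × Int) ∉ legal then legal ++ [(i, j)]
        else legal
      else legal)
      = if (decide (0 ≤ k ∧ k < (map.length : Int) ∧ 0 ≤ l ∧ l < ((PySem.List.pyGetD map 0 []).length : Int)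
            ∧ pvCell map k l ≠ -1)) = true ∧ ((i, j) : Int × Int) ∉ legal then legal ++ [(i, j)]
        else legal := by
    intro k legal l
    by_cases hg : 0 ≤ k ∧ k < (map.length : Int) ∧ 0 ≤ l ∧ l < ((PySem.List.pyGetD map 0 []).length : Int)
    · by_cases hc : pvCell map k l ≠ -1
      · simp [hg, hc]
      · simp [hg, hc]
    · have hbig : ¬(0 ≤ k ∧ k < (map.length : Int) ∧ 0 ≤ l ∧ l < ((PySem.List.pyGetD map 0 []).length : Int)
          ∧ pvCell map k l ≠ -1) := fun h => hg ⟨h.1, h.2.1, h.2.2.1, h.2.2.2.1⟩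
      simp [hg, hbig]
  simp only [hstep]
  have hinner : ∀ (k : Int) (legal : List (Int × Int)),
      (PySem.List.pyRange (j - 1) (j + 2) 1).foldl (fun legal l =>
        if (decide (0 ≤ k ∧ k < (map.length : Int) ∧ 0 ≤ l ∧ l < ((PySem.List.pyGetD map 0 []).length : Int)
              ∧ pvCell map k l ≠ -1)) = true ∧ ((i, j) : Int × Int) ∉ legal then legal ++ [(i, j)]
        else legal) legal
      = if ((PySem.List.pyRange (j - 1) (j + 2) 1).any fun l =>
            decide (0 ≤ k ∧ k < (map.length : Int) ∧ 0 ≤ l ∧ l < ((PySem.List.pyGetD map 0 []).length : Int)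
              ∧ pvCell map k l ≠ -1)) = true ∧ ((i, j) : Int × Int) ∉ legal then legal ++ [(i, j)]
        else legal := by
    intro k legal
    exact pv_foldl_mark _ _ _ _
  simp only [hinner]
  exact pv_foldl_mark _ _ _ _

-- merging A's "safe cell" branch with the window branch
theorem pv_cell_eq (c1 : Prop) [Decidable c1] (hb : Bool) (x : Int × Int) (a : List (Int × Int)) :
    (if c1 ∧ x ∉ a then a ++ [x]
     else if hb = true ∧ x ∉ a then a ++ [x] else a)
      = if (decide c1 || hb) = true ∧ x ∉ a then a ++ [x] else a := by
  by_cases h1 : c1 <;> by_cases hm : x ∈ a <;> by_cases h2 : hb = true <;> simp [h1, hm, h2]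

-- the row loop of A: appended pairs carry the current row index, so the
-- membership test never fires and the loop IS filter+map
theorem pv_A_inner (x1 : Int) (g : Int → Int → Bool) :
    ∀ (js : List Int), js.Nodup →
    ∀ legal : List (Int × Int), (∀ j ∈ js, ((x1, j) : Int × Int) ∉ legal) →
      js.foldl (fun a j => if g x1 j = true ∧ ((x1, j) : Int × Int) ∉ a then a ++ [(x1, j)] else a) legal
        = legal ++ (js.filter (fun j => g x1 j)).map (fun j => ((x1, j) : Int × Int)) := by
  intro js
  induction js with
  | nil => intro _ legal _; simp
  | cons j js ih =>
    intro hnd legal hmem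
    simp only [List.foldl_cons]
    rcases List.nodup_cons.mp hnd with ⟨hj, hnd'⟩
    by_cases hg : g x1 j = true
    · rw [if_pos ⟨hg, hmem j (by simp)⟩, ih hnd' _ ?_]
      · simp [hg]
      · intro j' hj'
        simp only [List.mem_append, List.mem_singleton]
        push Not
        exact ⟨hmem j' (by simp [hj']), by simp; intro h; exact hj (h ▸ hj')⟩
    · rw [if_neg (by tauto), ih hnd' _ (fun j' hj' => hmem j' (by simp [hj']))]
      simp [hg]

theorem pv_A_outer (g : Int → Int → Bool) (js : List Int) (hjnd : js.Nodup) :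
    ∀ (is : List Int), is.Nodup →
    ∀ legal : List (Int × Int), (∀ p ∈ legal, p.1 ∉ is) →
      is.foldl (fun a i => js.foldl (fun a j => if g i j = true ∧ ((i, j) : Int × Int) ∉ a then a ++ [(i, j)] else a) a) legal
        = legal ++ is.flatMap (fun i => (js.filter (fun j => g i j)).map (fun j => ((i, j) : Int × Int))) := by
  intro is
  induction is with
  | nil => intro _ legal _; simp
  | cons i is ih =>
    intro hnd legal hmem
    rcases List.nodup_cons.mp hnd with ⟨hi, hnd'⟩
    simp only [List.foldl_cons]
    rw [pv_A_inner i g js hjnd legal ?_, ih hnd' _ ?_]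
    · simp [List.flatMap_cons]
    · intro p hp
      rcases List.mem_append.mp hp with h | h
      · exact fun hmem' => hmem p h (by simp [hmem'])
      · rcases List.mem_map.mp h with ⟨j, _, rfl⟩
        simpa using hi
    · intro j _ hcon
      exact hmem _ hcon (by simp)

-- a safe cell hits its own window
theorem pv_hit_self (map : List (List Int)) (i j : Int)
    (hi : 0 ≤ i ∧ i < (map.length : Int))
    (hj : 0 ≤ j ∧ j < ((PySem.List.pyGetD map 0 []).length : Int)) :
    (decide (pvCell map i j ≠ -1) || pvHit map i j) = pvHit map i j := by
  by_cases hc : pvCell map i j ≠ -1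
  · have : pvHit map i j = true := by
      simp only [pvHit, List.any_eq_true, PySem.List.mem_pyRange_one, decide_eq_true_eq]
      exact ⟨i, by omega, j, by omega, by omega, by omega, by omega, by omega, hc⟩
    simp [this]
  · simp [hc]

theorem pvA_eq_spec (map : List (List Int)) : colorable map = pvSpecList map := by
  simp only [colorable, pv_window_eq, pv_cell_eq]
  rw [pv_A_outer (fun i j => decide (pvCell map i j ≠ -1) || pvHit map i j) _
        (PySem.List.nodup_pyRange_one _ _) _ (PySem.List.nodup_pyRange_one _ _) [] (by simp)]
  simp only [List.nil_append, pvSpecList]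
  refine List.flatMap_congr fun i hi => ?_
  rw [List.filter_congr fun j hj => ?_]
  rw [PySem.List.mem_pyRange_one] at hi
  rw [PySem.List.mem_pyRange_one] at hj
  exact pv_hit_self map i j (by omega) (by omega)

-- membership in B's fully built marked set
theorem pv_mem_marked (map : List (List Int)) (R C : Int) (y : Int × Int) :
    y ∈ ((PySem.List.pyRange 0 R 1).foldl (fun s i =>
          (PySem.List.pyRange 0 C 1).foldl (fun s j =>
            if pvCell map i j ≠ -1 then
              (PySem.List.pyRange (max 0 (i - 1)) (min R (i + 2)) 1).foldl (fun s k =>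
                (PySem.List.pyRange (max 0 (j - 1)) (min C (j + 2)) 1).foldl (fun s l =>
                  PySem.Set.add s (k, l)) s) s
            else s) s) PySem.Set.empty)
      ↔ ∃ i ∈ PySem.List.pyRange 0 R 1, ∃ j ∈ PySem.List.pyRange 0 C 1,
          pvCell map i j ≠ -1 ∧
          ∃ k ∈ PySem.List.pyRange (max 0 (i - 1)) (min R (i + 2)) 1,
          ∃ l ∈ PySem.List.pyRange (max 0 (j - 1)) (min C (j + 2)) 1, y = (k, l) := by
  rw [pv_mem_foldl_cover _
        (fun i y => ∃ j ∈ PySem.List.pyRange 0 C 1,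
          pvCell map i j ≠ -1 ∧
          ∃ k ∈ PySem.List.pyRange (max 0 (i - 1)) (min R (i + 2)) 1,
          ∃ l ∈ PySem.List.pyRange (max 0 (j - 1)) (min C (j + 2)) 1, y = (k, l)) ?_]
  · simp [PySem.Set.empty]
  intro s i y
  rw [pv_mem_foldl_cover _
        (fun j y => pvCell map i j ≠ -1 ∧
          ∃ k ∈ PySem.List.pyRange (max 0 (i - 1)) (min R (i + 2)) 1,
          ∃ l ∈ PySem.List.pyRange (max 0 (j - 1)) (min C (j + 2)) 1, y = (k, l)) ?_]
  intro s j y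
  by_cases hc : pvCell map i j ≠ -1
  · rw [if_pos hc,
      pv_mem_foldl_cover _
        (fun k y => ∃ l ∈ PySem.List.pyRange (max 0 (j - 1)) (min C (j + 2)) 1, y = (k, l)) ?_]
    · simp [hc]
    intro s k y
    rw [pv_mem_foldl_cover _ (fun l y => y = (k, l)) (fun s l y => PySem.Set.mem_add s (k, l) y)]
  · rw [if_neg hc]
    simp [hc]

theorem pv_contains_marked (map : List (List Int)) (a b : Int)
    (ha : 0 ≤ a ∧ a < (map.length : Int))
    (hb : 0 ≤ b ∧ b < ((PySem.List.pyGetD map 0 []).length : Int)) :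
    PySem.Set.contains
        ((PySem.List.pyRange 0 (map.length : Int) 1).foldl (fun s i =>
          (PySem.List.pyRange 0 ((PySem.List.pyGetD map 0 []).length : Int) 1).foldl (fun s j =>
            if pvCell map i j ≠ -1 then
              (PySem.List.pyRange (max 0 (i - 1)) (min (map.length : Int) (i + 2)) 1).foldl (fun s k =>
                (PySem.List.pyRange (max 0 (j - 1)) (min ((PySem.List.pyGetD map 0 []).length : Int) (j + 2)) 1).foldl (fun s l =>
                  PySem.Set.add s (k, l)) s) s
            else s) s) PySem.Set.empty) ((a, b) : Int × Int)
      = pvHit map a b := by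
  rw [Bool.eq_iff_iff, PySem.Set.contains_iff, pv_mem_marked]
  simp only [pvHit, List.any_eq_true, PySem.List.mem_pyRange_one, decide_eq_true_eq, Prod.mk.injEq]
  constructor
  · rintro ⟨i, hi, j, hj, hc, k, hk, l, hl, rfl, rfl⟩
    exact ⟨i, by omega, j, by omega, by omega, by omega, by omega, by omega, hc⟩
  · rintro ⟨k, hk, l, hl, h0k, hkR, h0l, hlC, hc⟩
    exact ⟨k, by omega, l, by omega, hc, a, by omega, b, by omega, rfl, rfl⟩

theorem pvB_eq_spec (map : List (List Int)) : colorable_alt map = pvSpecList map := by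
  cases map with
  | nil => rfl
  | cons r t =>
    simp only [colorable_alt]
    rw [if_neg (by simp; omega)]
    simp only [pvSpecList]
    refine List.flatMap_congr fun i hi => ?_
    rw [List.filter_congr fun j hj => ?_]
    rw [PySem.List.mem_pyRange_one] at hi
    rw [PySem.List.mem_pyRange_one] at hj
    exact pv_contains_marked (r :: t) i j (by omega) (by omega)

-- ===== VERDICT (by name: the statement is the Claim_ definition above) =====
theorem colorable_spec : Claim_equal_colorable := by
  intro map _ _
  unfold Spec_colorable
  rw [pvA_eq_spec, pvB_eq_spec]
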